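-- pv_equiv track=rewrite | github.com/sjava1902/telegram_bot_miphi | main.py | get_time_substr
-- ===== SOURCE A (Python) =====
-- def get_time_substr(sentence, time_words):
--     words = sentence.split(' ')
--     time_res, other_res = [], []
--     for word in words:
--         isTimeWord = False
--         for time_word in time_words:
--             if time_word in word:
--                 time_res.append(word)
--                 isTimeWord = True
--                 break
--         if not isTimeWord:
--             other_res.append(word)
--
--     res_str = ""
--     for elem in time_res:
--         res_str += elem + ' '
--
--     other_str = ""
--     for elem in other_res:
--         other_str += elem + ' '
--
--     return res_str, other_str
-- ===== SOURCE B (Python) =====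
-- def get_time_substr(sentence, time_words):
--     # Pattern-major sweep: each time word marks, in one pass, every word it
--     # occurs in (a boolean mark vector), then two join passes read off the
--     # partition.  Order of patterns does not matter, so this inverted
--     # traversal yields exactly A's word-major result.
--     words = sentence.split(' ')
--     matched = [False] * len(words)
--     for t in time_words:
--         matched = [m or (t in w) for w, m in zip(words, matched)]
--     time_str = ''.join(w + ' ' for w, m in zip(words, matched) if m)
--     other_str = ''.join(w + ' ' for w, m in zip(words, matched) if not m)
--     return time_str, other_str
-- ===== Notes on version B (the rewrite author's own statement) =====
-- stated objective: alternative
-- what changed: Inverted the traversal: instead of A's word-major nested loop with a break and two list accumulators, B makes one pattern-major sweep per time word over a boolean mark vector (no short-circuit, no intermediate result lists) and then reads the partition off with two join passes; equivalence needs a proof that the traversal order does not matter.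
import Mathlib
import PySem

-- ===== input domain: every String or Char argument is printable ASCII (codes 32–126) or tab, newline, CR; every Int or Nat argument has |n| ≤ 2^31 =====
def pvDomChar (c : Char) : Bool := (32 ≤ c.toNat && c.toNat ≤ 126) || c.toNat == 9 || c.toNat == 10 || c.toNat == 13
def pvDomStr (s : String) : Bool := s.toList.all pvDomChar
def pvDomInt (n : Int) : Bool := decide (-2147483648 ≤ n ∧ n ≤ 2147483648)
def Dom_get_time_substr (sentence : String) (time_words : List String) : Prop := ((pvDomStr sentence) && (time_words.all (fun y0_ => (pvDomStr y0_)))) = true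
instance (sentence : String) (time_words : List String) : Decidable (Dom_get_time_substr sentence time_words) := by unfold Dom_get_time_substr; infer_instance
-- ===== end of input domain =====

-- B inverts A's traversal: a pattern-major marking sweep over a boolean vector plus two join
-- passes, instead of A's word-major break loop with two list accumulators; objective: alternative.

-- ===== PORT A =====
-- inner 'for time_word in time_words: … break' loop of A (appends word to time_res on first hit)
def pvInnerA (time_words : List String) (word : String) (time_res : List String) :
    List String × Bool :=
  match time_words with
  | [] => (time_res, false)
  | t :: rest =>
      if PySem.Str.isIn t word then (time_res ++ [word], true)
      else pvInnerA rest word time_res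

def get_time_substr (sentence : String) (time_words : List String) : String × String :=
  let words := (PySem.Str.split? sentence " ").getD []  -- sep = " " ≠ "": split? is always some here
  let p := words.foldl
    (fun (acc : List String × List String) word =>
      let r := pvInnerA time_words word acc.1
      if !r.2 then (r.1, acc.2 ++ [word]) else (r.1, acc.2))
    ([], [])
  let res_str := p.1.foldl (fun s e => s ++ e ++ " ") ""
  let other_str := p.2.foldl (fun s e => s ++ e ++ " ") ""
  (res_str, other_str)

-- ===== PORT B =====
def get_time_substr_alt (sentence : String) (time_words : List String) : String × String :=
  let words := (PySem.Str.split? sentence " ").getD []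
  let matched := time_words.foldl
    (fun (marks : List Bool) t =>
      (words.zip marks).map (fun q => q.2 || PySem.Str.isIn t q.1))
    (List.replicate words.length false)
  let time_str := (words.zip matched).foldl
    (fun s q => if q.2 then s ++ q.1 ++ " " else s) ""
  let other_str := (words.zip matched).foldl
    (fun s q => if !q.2 then s ++ q.1 ++ " " else s) ""
  (time_str, other_str)

-- ===== PRECONDITION & SPEC =====
def Spec_get_time_substr (sentence : String) (time_words : List String) (out : String × String) : Prop := out = get_time_substr_alt sentence time_words
instance (sentence : String) (time_words : List String) (out : String × String) : Decidable (Spec_get_time_substr sentence time_words out) := by unfold Spec_get_time_substr; infer_instance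

-- ===== CLAIM (what is proved, stated in full; the proofs are below) =====
def Claim_equal_get_time_substr : Prop := ∀ (sentence : String) (time_words : List String), Dom_get_time_substr sentence time_words → Spec_get_time_substr sentence time_words (get_time_substr sentence time_words)

-- ===== LEMMAS AND PROOFS =====
theorem pvInnerA_eq (time_words : List String) (word : String) (time_res : List String) :
    pvInnerA time_words word time_res =
      (if time_words.any (fun t => PySem.Str.isIn t word) then time_res ++ [word] else time_res,
       time_words.any (fun t => PySem.Str.isIn t word)) := by
  induction time_words with
  | nil => simp [pvInnerA]
  | cons t rest ih =>
      simp only [pvInnerA, ih, List.any_cons]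
      by_cases h : PySem.Chars.isIn t.toList word.toList = true <;> simp [h]

theorem pvMapZip {α β γ : Type} (g : α × β → γ) :
    ∀ (a : List α) (b : List β),
      (a.zip b).map g = List.zipWith (fun x y => g (x, y)) a b := by
  intro a
  induction a with
  | nil => intro b; simp
  | cons x xs ih => intro b; cases b <;> simp [ih]

theorem pvZipWithComp {α β γ δ : Type} (f : α → γ → δ) (g : α → β → γ) :
    ∀ (a : List α) (b : List β),
      List.zipWith f a (List.zipWith g a b) = List.zipWith (fun x y => f x (g x y)) a b := by
  intro a
  induction a with
  | nil => intro b; simp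
  | cons x xs ih => intro b; cases b <;> simp [ih]

theorem pvZipWithId {α β : Type} :
    ∀ (a : List α) (b : List β), b.length = a.length →
      List.zipWith (fun (_ : α) (y : β) => y) a b = b := by
  intro a
  induction a with
  | nil => intro b h; simpa using (List.eq_nil_of_length_eq_zero h)
  | cons x xs ih =>
      intro b h
      cases b with
      | nil => simp at h
      | cons y ys => simp_all

theorem pvZipWithRepl {α β γ : Type} (f : α → β → γ) (c : β) :
    ∀ (a : List α), List.zipWith f a (List.replicate a.length c) = a.map (fun x => f x c) := by
  intro a
  induction a with
  | nil => simp
  | cons x xs ih => simpa [List.replicate_succ] using ih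

-- the pattern-major marking sweep computes per-word 'any' membership
theorem pvMarks (ws : List String) :
    ∀ (ts : List String) (marks : List Bool), marks.length = ws.length →
      ts.foldl (fun (marks : List Bool) t =>
          (ws.zip marks).map (fun q => q.2 || PySem.Str.isIn t q.1)) marks
        = List.zipWith (fun w m => m || ts.any (fun t => PySem.Str.isIn t w)) ws marks := by
  intro ts
  induction ts with
  | nil =>
      intro marks h
      simpa using (pvZipWithId ws marks h).symm
  | cons t ts ih =>
      intro marks h
      rw [List.foldl_cons, pvMapZip, ih _ (by simp [h]),
          pvZipWithComp (fun w m => m || ts.any (fun t => PySem.Str.isIn t w))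
            (fun w m => m || PySem.Str.isIn t w) ws marks]
      have : (fun (w : String) (m : Bool) => m || PySem.Str.isIn t w ||
                ts.any (fun t => PySem.Str.isIn t w))
           = (fun (w : String) (m : Bool) =>
                m || (t :: ts).any (fun t => PySem.Str.isIn t w)) := by
        funext w m; simp [Bool.or_assoc]
      rw [this]

theorem pvJoinZip (p : String → Bool) :
    ∀ (ws : List String) (acc : String),
      (ws.zip (ws.map p)).foldl (fun s q => if q.2 then s ++ q.1 ++ " " else s) acc
        = (ws.filter p).foldl (fun s w => s ++ w ++ " ") acc := by
  intro ws
  induction ws with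
  | nil => intro acc; simp
  | cons w ws ih =>
      intro acc
      by_cases h : p w = true
      · simpa [List.filter_cons, h] using ih (acc ++ w ++ " ")
      · simpa [List.filter_cons, h] using ih acc

theorem pvJoinZipNeg (p : String → Bool) :
    ∀ (ws : List String) (acc : String),
      (ws.zip (ws.map p)).foldl (fun s q => if !q.2 then s ++ q.1 ++ " " else s) acc
        = (ws.filter (fun w => !p w)).foldl (fun s w => s ++ w ++ " ") acc := by
  intro ws
  induction ws with
  | nil => intro acc; simp
  | cons w ws ih =>
      intro acc
      by_cases h : p w = true
      · simpa [List.filter_cons, h] using ih acc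
      · simpa [List.filter_cons, h] using ih (acc ++ w ++ " ")

-- A's partition loop produces the two filters
theorem pvALoop (time_words ws : List String) :
    ws.foldl
      (fun (acc : List String × List String) word =>
        let r := pvInnerA time_words word acc.1
        if !r.2 then (r.1, acc.2 ++ [word]) else (r.1, acc.2)) ([], [])
      = (ws.filter (fun w => time_words.any (fun t => PySem.Str.isIn t w)),
         ws.filter (fun w => !time_words.any (fun t => PySem.Str.isIn t w))) := by
  set p : String → Bool := fun w => time_words.any (fun t => PySem.Str.isIn t w) with hp
  rw [PySem.List.foldl_congr_mem ws _
        (fun (acc : List String × List String) word =>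
          ((fun tr w => if p w then tr ++ [w] else tr) acc.1 word,
           (fun os w => if !p w then os ++ [w] else os) acc.2 word)) ([], [])
        (by
          intro acc w _
          simp only [pvInnerA_eq, hp]
          cases h : time_words.any (fun t => PySem.Str.isIn t w) <;> simp)]
  rw [PySem.List.foldl_prod_mk (f := fun tr w => if p w then tr ++ [w] else tr)
        (g := fun os w => if !p w then os ++ [w] else os)]
  rw [PySem.List.foldl_append_if_eq_filter p ws [],
      PySem.List.foldl_append_if_eq_filter (fun w => !p w) ws []]
  simp [hp, PySem.Str.isIn]

-- ===== VERDICT (by name: the statement is the Claim_ definition above) =====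
theorem get_time_substr_spec : Claim_equal_get_time_substr := by
  intro sentence time_words _
  show get_time_substr sentence time_words = get_time_substr_alt sentence time_words
  unfold get_time_substr get_time_substr_alt
  set ws := (PySem.Str.split? sentence " ").getD [] with hws
  set p : String → Bool := fun w => time_words.any (fun t => PySem.Str.isIn t w) with hp
  have hm : time_words.foldl
      (fun (marks : List Bool) t =>
        (ws.zip marks).map (fun q => q.2 || PySem.Str.isIn t q.1))
      (List.replicate ws.length false) = ws.map p := by
    rw [pvMarks ws time_words _ (by simp), pvZipWithRepl]
    simp [hp]
  simp only [pvALoop, hm, hp]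
  rw [pvJoinZip p ws "", pvJoinZipNeg p ws ""]
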